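-- pv_equiv track=rewrite | github.com/lcbb/aPrime | http/cgi-bin/primerLib.py | check_self_comp
-- ===== SOURCE A (Python) =====
-- def check_self_comp(seq):
-- 	checker = 0;
-- 	seqRC=[]
-- 	seqRev=list(reversed(seq));
-- 	seqOri=list(reversed(seqRev));
-- 	for i in seqRev:
-- 		if i=='A':
-- 			seqRC+='T'
-- 		elif i=='T':
-- 			seqRC+='A'
-- 		elif i=='C':
-- 			seqRC+='G'
-- 		elif i=='G':
-- 			seqRC+='C'
-- 	if seqOri==seqRC:
-- 		checker=1;
-- 	return checker;
-- ===== SOURCE B (Python) =====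
-- def check_self_comp(seq):
--     comp = {'A': 'T', 'T': 'A', 'C': 'G', 'G': 'C'}
--     n = len(seq)
--     for i in range(n):
--         c = comp.get(seq[i])
--         if c is None or seq[n - 1 - i] != c:
--             return 0
--     return 1
-- ===== Notes on version B (the rewrite author's own statement) =====
-- stated objective: faster
-- what changed: Replaces the reverse + reverse-complement list construction and whole-list comparison by a single two-pointer index pass with a complement dict, returning 0 at the first mismatching or non-ACGT position (no intermediate lists, early exit).
import Mathlib
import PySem

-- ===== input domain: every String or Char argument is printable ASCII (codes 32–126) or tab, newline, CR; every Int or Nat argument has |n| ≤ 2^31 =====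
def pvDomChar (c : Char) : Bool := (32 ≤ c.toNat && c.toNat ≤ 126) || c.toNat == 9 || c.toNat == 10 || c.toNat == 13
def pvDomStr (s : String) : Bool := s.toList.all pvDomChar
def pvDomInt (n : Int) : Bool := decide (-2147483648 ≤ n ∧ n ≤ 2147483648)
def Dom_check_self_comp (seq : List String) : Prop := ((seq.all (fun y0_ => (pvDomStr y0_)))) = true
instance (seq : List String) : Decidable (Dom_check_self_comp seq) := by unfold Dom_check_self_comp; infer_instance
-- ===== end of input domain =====

-- B replaces A's reverse + reverse-complement list construction and whole-list comparison by a
-- single two-pointer index pass over a complement dict with early exit (measured constant-factor speedup).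


-- ===== PORT A =====
def check_self_comp (seq : List String) : Int :=
  let checker : Int := 0
  let seqRC : List String := []
  let seqRev := seq.reverse
  let seqOri := seqRev.reverse
  let seqRC := seqRev.foldl (fun acc i =>
    if i = "A" then acc ++ ["T"]
    else if i = "T" then acc ++ ["A"]
    else if i = "C" then acc ++ ["G"]
    else if i = "G" then acc ++ ["C"]
    else acc) seqRC
  if seqOri = seqRC then 1 else checker

-- ===== PORT B =====
def pvCompDict : PySem.Dict String String :=
  PySem.Dict.ofList [("A", "T"), ("T", "A"), ("C", "G"), ("G", "C")]

def check_self_comp_alt_go (seq : List String) (n : Int) : List Int → Int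
  | [] => 1
  | i :: rest =>
    match PySem.List.pyGet? seq i with
    | none => 0
    | some s =>
      match pvCompDict.get? s with
      | none => 0
      | some c =>
        if PySem.List.pyGet? seq (n - 1 - i) = some c then
          check_self_comp_alt_go seq n rest
        else 0

def check_self_comp_alt (seq : List String) : Int :=
  check_self_comp_alt_go seq (seq.length : Int)
    (PySem.List.pyRange 0 (seq.length : Int) 1)

-- ===== PRECONDITION & SPEC =====
def Spec_check_self_comp (seq : List String) (out : Int) : Prop := out = check_self_comp_alt seq
instance (seq : List String) (out : Int) : Decidable (Spec_check_self_comp seq out) := by unfold Spec_check_self_comp; infer_instance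

-- ===== CLAIM (what is proved, stated in full; the proofs are below) =====
def Claim_equal_check_self_comp : Prop := ∀ (seq : List String), Dom_check_self_comp seq → Spec_check_self_comp seq (check_self_comp seq)

-- ===== LEMMAS AND PROOFS =====

/-- The complement map A's if-chain computes, as a partial function. -/
def pvComp? (s : String) : Option String :=
  if s = "A" then some "T"
  else if s = "T" then some "A"
  else if s = "C" then some "G"
  else if s = "G" then some "C"
  else none

theorem pvCompDict_get? (s : String) : pvCompDict.get? s = pvComp? s := by
  by_cases h1 : s = "A"
  · subst h1; decide
  by_cases h2 : s = "T"
  · subst h2; decide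
  by_cases h3 : s = "C"
  · subst h3; decide
  by_cases h4 : s = "G"
  · subst h4; decide
  have hd : pvCompDict = PySem.Dict.mk [("A", "T"), ("T", "A"), ("C", "G"), ("G", "C")] := by
    decide
  have g1 : ¬("A" = s) := fun e => h1 e.symm
  have g2 : ¬("T" = s) := fun e => h2 e.symm
  have g3 : ¬("C" = s) := fun e => h3 e.symm
  have g4 : ¬("G" = s) := fun e => h4 e.symm
  rw [hd]
  simp [PySem.Dict.get?_mk_cons, PySem.Dict.get?, pvComp?, beq_iff_eq,
    h1, h2, h3, h4, g1, g2, g3, g4]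

theorem pvFold_eq_filterMap (l acc : List String) :
    l.foldl (fun acc i =>
      if i = "A" then acc ++ ["T"]
      else if i = "T" then acc ++ ["A"]
      else if i = "C" then acc ++ ["G"]
      else if i = "G" then acc ++ ["C"]
      else acc) acc = acc ++ l.filterMap pvComp? := by
  induction l generalizing acc with
  | nil => simp
  | cons x xs ih =>
    by_cases h1 : x = "A"
    · simp [pvComp?, h1, ih]
    by_cases h2 : x = "T"
    · simp [pvComp?, h1, h2, ih]
    by_cases h3 : x = "C"
    · simp [pvComp?, h1, h2, h3, ih]
    by_cases h4 : x = "G"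
    · simp [pvComp?, h1, h2, h3, h4, ih]
    simp [pvComp?, h1, h2, h3, h4, ih]

theorem pvFilterMap_eq_iff_map {α β : Type} (f : α → Option β) :
    ∀ (xs : List α) (ys : List β), xs.length = ys.length →
      (ys = xs.filterMap f ↔ xs.map f = ys.map some) := by
  intro xs
  induction xs with
  | nil =>
    intro ys h
    cases ys with
    | nil => simp
    | cons y ys => simp at h
  | cons x xs ih =>
    intro ys h
    cases ys with
    | nil => simp at h
    | cons y ys =>
      simp only [List.length_cons, Nat.add_right_cancel_iff] at h
      cases hfx : f x with
      | none =>
        constructor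
        · intro he
          exfalso
          have hle := List.length_filterMap_le f xs
          rw [List.filterMap_cons, hfx] at he
          have hlen2 : (y :: ys).length = (List.filterMap f xs).length := by rw [he]
          simp only [List.length_cons] at hlen2
          omega
        · intro he
          simp [hfx] at he
      | some c =>
        rw [List.filterMap_cons, hfx, List.map_cons, List.map_cons, hfx]
        constructor
        · intro he
          rw [List.cons_eq_cons] at he
          obtain ⟨h1, h2⟩ := he
          rw [List.cons_eq_cons]
          exact ⟨by rw [h1], (ih ys h).mp h2⟩
        · intro he
          rw [List.cons_eq_cons] at he
          obtain ⟨h1, h2⟩ := he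
          injection h1 with h1
          rw [List.cons_eq_cons]
          exact ⟨h1.symm, (ih ys h).mpr h2⟩

/-- Index characterisation of A's success condition. -/
theorem pvA_cond_iff (seq : List String) :
    seq = seq.reverse.filterMap pvComp? ↔
      ∀ (k : Nat) (hk : k < seq.length),
        pvComp? (seq[seq.length - 1 - k]'(by omega)) = some seq[k] := by
  rw [pvFilterMap_eq_iff_map pvComp? seq.reverse seq (by simp)]
  constructor
  · intro h k hk
    have h1 : k < (seq.reverse.map pvComp?).length := by simp [hk]
    have := List.getElem_of_eq h h1
    simp only [List.getElem_map, List.getElem_reverse, List.length_reverse] at this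
    exact this
  · intro h
    apply List.ext_getElem (by simp)
    intro k h1 h2
    simp only [List.getElem_map, List.getElem_reverse, List.length_reverse]
    simp only [List.length_map, List.length_reverse] at h1
    exact h k h1

/-- Boolean per-index check that B's loop performs. -/
def pvOkB (seq : List String) (n i : Int) : Bool :=
  match PySem.List.pyGet? seq i with
  | none => false
  | some s =>
    match pvComp? s with
    | none => false
    | some c => PySem.List.pyGet? seq (n - 1 - i) == some c

theorem pvAltGo_eq (seq : List String) (n : Int) (l : List Int) :
    check_self_comp_alt_go seq n l = if l.all (pvOkB seq n) then 1 else 0 := by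
  induction l with
  | nil => simp [check_self_comp_alt_go]
  | cons i rest ih =>
    cases hg : PySem.List.pyGet? seq i with
    | none => simp [check_self_comp_alt_go, pvOkB, hg, pvCompDict_get?]
    | some s =>
      cases hc : pvComp? s with
      | none => simp [check_self_comp_alt_go, pvOkB, hg, hc, pvCompDict_get?]
      | some c =>
        by_cases he : PySem.List.pyGet? seq (n - 1 - i) = some c
        · simp [check_self_comp_alt_go, pvOkB, hg, hc, he, pvCompDict_get?, ih]
        · simp [check_self_comp_alt_go, pvOkB, hg, hc, he, pvCompDict_get?]

theorem pvOkB_iff (seq : List String) (k : Nat) (hk : k < seq.length) :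
    pvOkB seq (seq.length : Int) ((k : Int)) = true ↔
      ∃ c, pvComp? seq[k] = some c ∧
        seq[seq.length - 1 - k]'(by omega) = c := by
  unfold pvOkB
  rw [PySem.List.pyGet?_natCast, List.getElem?_eq_getElem hk]
  have harith : ((seq.length : Int) - 1 - (k : Int)) = ((seq.length - 1 - k : Nat) : Int) := by
    omega
  rw [harith, PySem.List.pyGet?_natCast,
    List.getElem?_eq_getElem (show seq.length - 1 - k < seq.length by omega)]
  cases hc : pvComp? seq[k] with
  | none => simp [hc]
  | some c => simp [hc, beq_iff_eq]; exact eq_comm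

-- ===== VERDICT (by name: the statement is the Claim_ definition above) =====
theorem check_self_comp_spec : Claim_equal_check_self_comp := by
  intro seq _
  unfold Spec_check_self_comp check_self_comp check_self_comp_alt
  simp only [List.reverse_reverse]
  rw [pvFold_eq_filterMap, List.nil_append, pvAltGo_eq]
  have hiff : (seq = seq.reverse.filterMap pvComp?) ↔
      ((PySem.List.pyRange 0 (seq.length : Int) 1).all (pvOkB seq (seq.length : Int)) = true) := by
    rw [pvA_cond_iff, List.all_eq_true]
    constructor
    · intro h i hi
      rw [PySem.List.mem_pyRange_one] at hi
      obtain ⟨h0, h1⟩ := hi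
      obtain ⟨k, rfl⟩ : ∃ k : Nat, (k : Int) = i := ⟨i.toNat, by omega⟩
      have hk : k < seq.length := by exact_mod_cast h1
      rw [pvOkB_iff seq k hk]
      have hmain := h (seq.length - 1 - k) (by omega)
      have heq : seq.length - 1 - (seq.length - 1 - k) = k := by omega
      simp_rw [heq] at hmain
      exact ⟨seq[seq.length - 1 - k]'(by omega), hmain, rfl⟩
    · intro h k hk
      have hmem : ((seq.length - 1 - k : Nat) : Int) ∈
          PySem.List.pyRange 0 (seq.length : Int) 1 := by
        rw [PySem.List.mem_pyRange_one]; omega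
      have hok := h _ hmem
      rw [pvOkB_iff seq (seq.length - 1 - k) (by omega)] at hok
      obtain ⟨c, hc, he⟩ := hok
      have heq : seq.length - 1 - (seq.length - 1 - k) = k := by omega
      simp_rw [heq] at he
      rw [← he] at hc
      exact hc
  by_cases h : seq = seq.reverse.filterMap pvComp?
  · rw [if_pos h, if_pos (hiff.mp h)]
  · rw [if_neg h, if_neg (fun hb => h (hiff.mpr hb))]
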